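-- pv_equiv track=rewrite | github.com/vivizerocode/SMM2-RNG | patterns.py | find_alternating_patterns
-- ===== SOURCE A (Python) =====
-- def find_alternating_patterns(binary_sequence, start_value):
--     """Find the longest alternating 1-0 or 0-1 patterns, including X positions."""
--     max_pattern = []
--     current_pattern = [start_value]
--     start_pos = None
--
--     for i in range(1, len(binary_sequence)):
--         if binary_sequence[i] != binary_sequence[i-1]:
--             if not current_pattern:
--                 start_pos = i - 1  # We mark the start position when an alternating pattern begins
--             current_pattern.append(binary_sequence[i])
--         else:
--             if current_pattern:
--                 max_pattern.append((len(current_pattern), start_pos))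
--             current_pattern = [binary_sequence[i]]
--             start_pos = i  # Set the new start position for the next sequence
--
--     # Add the last pattern if available
--     if current_pattern:
--         max_pattern.append((len(current_pattern), start_pos))
--
--     # Make sure no None start_pos is left
--     return [(length, pos if pos is not None else 0) for length, pos in max_pattern]
-- ===== SOURCE B (Python) =====
-- def find_alternating_patterns(binary_sequence, start_value):
--     n = len(binary_sequence)
--     if n == 0:
--         return []
--     breaks = [i for i in range(1, n) if binary_sequence[i] == binary_sequence[i - 1]]
--     bounds = [0] + breaks + [n]
--     return [(bounds[k + 1] - bounds[k], bounds[k]) for k in range(len(bounds) - 1)]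
-- ===== Notes on version B (the rewrite author's own statement) =====
-- stated objective: alternative
-- what changed: B collects the break indices (positions where adjacent elements are equal) in one pass, forms the boundary list [0]+breaks+[n], and maps consecutive boundary pairs to (length, start) pairs, instead of A's stateful loop that maintains a growing current_pattern list, emits on each break and patches None positions afterwards.
-- intended difference: On the empty sequence A returns [(1, 0)] - a length-1 pattern produced by its phantom start_value seed - while B returns [], the intended 'no patterns in an empty sequence'. — e.g. on find_alternating_patterns([], 0): A returns [(1, 0)], B returns []
import Mathlib
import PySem

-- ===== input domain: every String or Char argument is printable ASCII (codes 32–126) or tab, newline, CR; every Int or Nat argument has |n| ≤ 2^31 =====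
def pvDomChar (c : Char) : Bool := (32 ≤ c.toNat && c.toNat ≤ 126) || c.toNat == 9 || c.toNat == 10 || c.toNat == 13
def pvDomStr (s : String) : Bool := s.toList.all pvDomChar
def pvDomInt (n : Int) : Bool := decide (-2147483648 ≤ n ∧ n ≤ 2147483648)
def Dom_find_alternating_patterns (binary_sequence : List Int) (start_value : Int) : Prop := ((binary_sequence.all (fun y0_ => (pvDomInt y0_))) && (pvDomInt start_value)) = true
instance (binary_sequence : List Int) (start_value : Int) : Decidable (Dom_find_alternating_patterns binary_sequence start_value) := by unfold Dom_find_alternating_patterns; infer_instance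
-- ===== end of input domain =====

-- B segments the sequence via breakpoint indices and boundary-pair differences instead of A's
-- stateful run accumulator; same results except on the empty sequence (see D_ below).

-- ===== PORT A =====
-- state: (max_pattern, current_pattern, start_pos)
def find_alternating_patterns (binary_sequence : List Int) (start_value : Int) : List (Int × Int) :=
  let n : Int := binary_sequence.length
  let st := (PySem.List.pyRange 1 n).foldl
    (fun (s : List (Int × Option Int) × List Int × Option Int) i =>
      let mp := s.1; let cp := s.2.1; let sp := s.2.2
      if PySem.List.pyGetD binary_sequence i 0 ≠ PySem.List.pyGetD binary_sequence (i-1) 0 then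
        if cp = [] then (mp, cp ++ [PySem.List.pyGetD binary_sequence i 0], some (i-1))
        else (mp, cp ++ [PySem.List.pyGetD binary_sequence i 0], sp)
      else
        if cp = [] then (mp, [PySem.List.pyGetD binary_sequence i 0], some i)
        else (mp ++ [((cp.length : Int), sp)], [PySem.List.pyGetD binary_sequence i 0], some i))
    ([], [start_value], none)
  let mp := if st.2.1 = [] then st.1 else st.1 ++ [((st.2.1.length : Int), st.2.2)]
  mp.map (fun p => (p.1, p.2.getD 0))

-- ===== PORT B =====
def find_alternating_patterns_alt (binary_sequence : List Int) (start_value : Int) : List (Int × Int) :=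
  let n : Int := binary_sequence.length
  if n = 0 then []
  else
    let breaks := (PySem.List.pyRange 1 n).filter
      (fun i => PySem.List.pyGetD binary_sequence i 0 = PySem.List.pyGetD binary_sequence (i-1) 0)
    let bounds := [(0 : Int)] ++ breaks ++ [n]
    (PySem.List.pyRange 0 ((bounds.length : Int) - 1)).map
      (fun k => (PySem.List.pyGetD bounds (k+1) 0 - PySem.List.pyGetD bounds k 0,
                 PySem.List.pyGetD bounds k 0))

-- ===== PRECONDITION & SPEC =====
-- On the empty sequence A returns [(1, 0)] — a length-1 pattern produced by its phantom
-- start_value seed — while B returns [], the intended "no patterns in an empty sequence".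
def D_find_alternating_patterns (binary_sequence : List Int) (start_value : Int) : Prop :=
  binary_sequence = []
instance (binary_sequence : List Int) (start_value : Int) : Decidable (D_find_alternating_patterns binary_sequence start_value) := by unfold D_find_alternating_patterns; infer_instance
def Spec_find_alternating_patterns (binary_sequence : List Int) (start_value : Int) (out : List (Int × Int)) : Prop := ¬ D_find_alternating_patterns binary_sequence start_value → out = find_alternating_patterns_alt binary_sequence start_value
instance (binary_sequence : List Int) (start_value : Int) (out : List (Int × Int)) : Decidable (Spec_find_alternating_patterns binary_sequence start_value out) := by unfold Spec_find_alternating_patterns; infer_instance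
def pvDiffWitness_find_alternating_patterns : List Int × Int := ([], 0)
def pvDiffWitnessOut_find_alternating_patterns : (List (Int × Int)) × (List (Int × Int)) := ([(1, 0)], [])

-- ===== CLAIM (what is proved, stated in full; the proofs are below) =====
def Claim_unchanged_find_alternating_patterns : Prop := ∀ (binary_sequence : List Int) (start_value : Int), Dom_find_alternating_patterns binary_sequence start_value → Spec_find_alternating_patterns binary_sequence start_value (find_alternating_patterns binary_sequence start_value)
def Claim_changed_find_alternating_patterns : Prop := Dom_find_alternating_patterns (pvDiffWitness_find_alternating_patterns.1) (pvDiffWitness_find_alternating_patterns.2) ∧ D_find_alternating_patterns (pvDiffWitness_find_alternating_patterns.1) (pvDiffWitness_find_alternating_patterns.2) ∧ find_alternating_patterns (pvDiffWitness_find_alternating_patterns.1) (pvDiffWitness_find_alternating_patterns.2) = pvDiffWitnessOut_find_alternating_patterns.1 ∧ find_alternating_patterns_alt (pvDiffWitness_find_alternating_patterns.1) (pvDiffWitness_find_alternating_patterns.2) = pvDiffWitnessOut_find_alternating_patterns.2 ∧ pvDiffWitnessOut_find_alternating_patterns.1 ≠ pvDiffWitnessOut_find_alternating_patterns.2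
def Claim_exact_find_alternating_patterns : Prop := ∀ (binary_sequence : List Int) (start_value : Int), Dom_find_alternating_patterns binary_sequence start_value → D_find_alternating_patterns binary_sequence start_value → find_alternating_patterns binary_sequence start_value ≠ find_alternating_patterns_alt binary_sequence start_value

-- ===== LEMMAS AND PROOFS =====

-- the break indices of xs (B's `breaks` list), named for the proofs
def pvBreaks (xs : List Int) : List Int :=
  (PySem.List.pyRange 1 (xs.length : Int)).filter
    (fun i => PySem.List.pyGetD xs i 0 = PySem.List.pyGetD xs (i-1) 0)

-- last boundary: the last element of prev :: bs
def pvLastB (prev : Int) (bs : List Int) : Int :=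
  match bs with
  | [] => prev
  | b :: rest => pvLastB b rest

-- the start_pos A stores for the segment that is open after breaks bs
def pvPosW (pos : Option Int) (bs : List Int) : Option Int :=
  match bs with
  | [] => pos
  | b :: rest => some (pvLastB b rest)

-- A's emitted max_pattern entries for breaks bs, starting from boundary prev with stored pos
def pvMpAux (prev : Int) (pos : Option Int) (bs : List Int) : List (Int × Option Int) :=
  match bs with
  | [] => []
  | b :: rest => (b - prev, pos) :: pvMpAux b (some b) rest

-- B's boundary-difference pass, recursively
def pvDiffPairs : List Int → List (Int × Int)
  | a :: b :: rest => (b - a, a) :: pvDiffPairs (b :: rest)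
  | _ => []

theorem pvLastB_concat (prev b : Int) (bs : List Int) :
    pvLastB prev (bs ++ [b]) = b := by
  induction bs generalizing prev with
  | nil => rfl
  | cons c r ih => simpa [pvLastB] using ih c

theorem pvPosW_concat (pos : Option Int) (b : Int) (bs : List Int) :
    pvPosW pos (bs ++ [b]) = some b := by
  cases bs with
  | nil => rfl
  | cons c r => simp [pvPosW, pvLastB_concat]

theorem pvMpAux_concat (prev b : Int) (pos : Option Int) (bs : List Int) :
    pvMpAux prev pos (bs ++ [b])
      = pvMpAux prev pos bs ++ [(b - pvLastB prev bs, pvPosW pos bs)] := by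
  induction bs generalizing prev pos with
  | nil => rfl
  | cons c r ih =>
      simp only [List.cons_append, pvMpAux, pvLastB, pvPosW, ih c (some c)]
      cases r <;> rfl

theorem pvPosW_getD (prev : Int) (pos : Option Int) (bs : List Int) (h : pos.getD 0 = prev) :
    (pvPosW pos bs).getD 0 = pvLastB prev bs := by
  cases bs with
  | nil => simpa [pvPosW, pvLastB] using h
  | cons c r => simp [pvPosW, pvLastB]

theorem pvBridge (bs : List Int) (prev n : Int) (pos : Option Int) (h : pos.getD 0 = prev) :
    pvDiffPairs (prev :: bs ++ [n])
      = (pvMpAux prev pos bs).map (fun p => (p.1, p.2.getD 0))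
        ++ [(n - pvLastB prev bs, pvLastB prev bs)] := by
  induction bs generalizing prev pos with
  | nil => simp [pvDiffPairs, pvMpAux, pvLastB]
  | cons b rest ih =>
      simp only [List.cons_append, pvDiffPairs, pvMpAux, pvLastB, List.map_cons, h]
      rw [← List.cons_append, ih b (some b) rfl]

theorem pvGetD_append_left (xs ys : List Int) (i : Int) (d : Int)
    (h0 : 0 ≤ i) (h1 : i < (xs.length : Int)) :
    PySem.List.pyGetD (xs ++ ys) i d = PySem.List.pyGetD xs i d := by
  rw [PySem.List.pyGetD_eq_getElem _ d h0 (by simp; omega),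
      PySem.List.pyGetD_eq_getElem _ d h0 h1]
  exact List.getElem_append_left (by omega)

theorem pvGetD_concat_last (xs : List Int) (x d : Int) :
    PySem.List.pyGetD (xs ++ [x]) (xs.length : Int) d = x := by
  rw [PySem.List.pyGetD_eq_getElem _ d (by positivity) (by simp)]
  simp

theorem pvBreaks_concat (xs : List Int) (x : Int) (hne : xs ≠ []) :
    pvBreaks (xs ++ [x])
      = pvBreaks xs ++ (if PySem.List.pyGetD (xs ++ [x]) (xs.length : Int) 0
            = PySem.List.pyGetD (xs ++ [x]) ((xs.length : Int) - 1) 0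
          then [(xs.length : Int)] else []) := by
  have hlen : ((xs ++ [x]).length : Int) = (xs.length : Int) + 1 := by simp
  have h1 : (1 : Int) ≤ (xs.length : Int) := by
    have : 0 < xs.length := List.length_pos_iff.mpr hne
    omega
  unfold pvBreaks
  rw [hlen, PySem.List.pyRange_one_succ_right h1, List.filter_append]
  congr 1
  · apply List.filter_congr
    intro i hi
    have hmem := (PySem.List.mem_pyRange_one).mp hi
    have e1 : PySem.List.pyGetD (xs ++ [x]) i 0 = PySem.List.pyGetD xs i 0 :=
      pvGetD_append_left xs [x] i 0 (by omega) (by omega)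
    have e2 : PySem.List.pyGetD (xs ++ [x]) (i-1) 0 = PySem.List.pyGetD xs (i-1) 0 :=
      pvGetD_append_left xs [x] (i-1) 0 (by omega) (by omega)
    simp [e1, e2]
  · simp [List.filter_singleton]

-- the invariant of A's loop: its final state is described by the break list
theorem pvLoopA_inv (xs : List Int) (sv : Int) (hne : xs ≠ []) :
    ∃ cp : List Int,
      (PySem.List.pyRange 1 (xs.length : Int)).foldl
        (fun (s : List (Int × Option Int) × List Int × Option Int) i =>
          let mp := s.1; let cp := s.2.1; let sp := s.2.2
          if PySem.List.pyGetD xs i 0 ≠ PySem.List.pyGetD xs (i-1) 0 then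
            if cp = [] then (mp, cp ++ [PySem.List.pyGetD xs i 0], some (i-1))
            else (mp, cp ++ [PySem.List.pyGetD xs i 0], sp)
          else
            if cp = [] then (mp, [PySem.List.pyGetD xs i 0], some i)
            else (mp ++ [((cp.length : Int), sp)], [PySem.List.pyGetD xs i 0], some i))
        ([], [sv], none)
      = (pvMpAux 0 none (pvBreaks xs), cp, pvPosW none (pvBreaks xs))
      ∧ (cp.length : Int) = (xs.length : Int) - pvLastB 0 (pvBreaks xs) ∧ cp ≠ [] := by
  induction xs using List.reverseRecOn with
  | nil => exact absurd rfl hne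
  | append_singleton xs x ih =>
    by_cases hxs : xs = []
    · subst hxs
      refine ⟨[sv], ?_, ?_, by simp⟩
      · simp [PySem.List.pyRange_one_eq_nil (by norm_num : (1:Int) ≤ 1), pvBreaks,
              pvMpAux, pvPosW]
      · simp [pvBreaks, PySem.List.pyRange_one_eq_nil (by norm_num : (1:Int) ≤ 1), pvLastB]
    · obtain ⟨cp, hfold, hlen, hcp⟩ := ih hxs
      have h1 : (1 : Int) ≤ (xs.length : Int) := by
        have : 0 < xs.length := List.length_pos_iff.mpr hxs
        omega
      have hlen' : ((xs ++ [x]).length : Int) = (xs.length : Int) + 1 := by simp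
      rw [hlen', PySem.List.pyRange_one_succ_right h1, List.foldl_append]
      rw [PySem.List.foldl_congr_mem _ _
        (fun (s : List (Int × Option Int) × List Int × Option Int) i =>
          let mp := s.1; let cp := s.2.1; let sp := s.2.2
          if PySem.List.pyGetD xs i 0 ≠ PySem.List.pyGetD xs (i-1) 0 then
            if cp = [] then (mp, cp ++ [PySem.List.pyGetD xs i 0], some (i-1))
            else (mp, cp ++ [PySem.List.pyGetD xs i 0], sp)
          else
            if cp = [] then (mp, [PySem.List.pyGetD xs i 0], some i)
            else (mp ++ [((cp.length : Int), sp)], [PySem.List.pyGetD xs i 0], some i))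
        ([], [sv], none) ?hagree]
      case hagree =>
        intro acc i hi
        have hmem := (PySem.List.mem_pyRange_one).mp hi
        have e1 : PySem.List.pyGetD (xs ++ [x]) i 0 = PySem.List.pyGetD xs i 0 :=
          pvGetD_append_left xs [x] i 0 (by omega) (by omega)
        have e2 : PySem.List.pyGetD (xs ++ [x]) (i-1) 0 = PySem.List.pyGetD xs (i-1) 0 :=
          pvGetD_append_left xs [x] (i-1) 0 (by omega) (by omega)
        simp only [e1, e2]
      rw [hfold]
      rw [pvBreaks_concat xs x hxs]
      by_cases hb : PySem.List.pyGetD (xs ++ [x]) (xs.length : Int) 0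
          = PySem.List.pyGetD (xs ++ [x]) ((xs.length : Int) - 1) 0
      · -- a break at index xs.length: A emits the open segment and restarts
        rw [if_pos hb]
        refine ⟨[PySem.List.pyGetD (xs ++ [x]) (xs.length : Int) 0], ?_, ?_, by simp⟩
        · rw [List.foldl_cons, List.foldl_nil, pvMpAux_concat, pvPosW_concat, ← hlen]
          simp [hb, hcp]
        · rw [pvLastB_concat]
          simp
      · -- no break: the open segment grows by one element
        rw [if_neg hb, List.append_nil]
        refine ⟨cp ++ [PySem.List.pyGetD (xs ++ [x]) (xs.length : Int) 0], ?_, ?_, by simp⟩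
        · rw [List.foldl_cons, List.foldl_nil]
          have hb' : ¬ x = PySem.List.pyGetD (xs ++ [x]) ((xs.length : Int) - 1) 0 := by
            simpa [pvGetD_concat_last] using hb
          simp [hb', hcp]
        · simp only [List.length_append, List.length_cons, List.length_nil]
          push_cast
          omega

-- B's pyRange/pyGetD boundary map equals the recursive boundary-difference pass
theorem pvMapRange_getD (l : List Int) :
    (List.range (l.length - 1)).map
      (fun k => ((l.getD (k+1) 0 : Int) - l.getD k 0, (l.getD k 0 : Int))) = pvDiffPairs l := by
  induction l with
  | nil => rfl
  | cons a l ih =>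
    cases l with
    | nil => rfl
    | cons b rest =>
      simp only [List.length_cons, Nat.add_sub_cancel] at *
      rw [List.range_succ_eq_map, List.map_cons, List.map_map,
          show pvDiffPairs (a :: b :: rest) = (b - a, a) :: pvDiffPairs (b :: rest) from rfl]
      congr 1

theorem pvMapRange_eq_diffPairs (l : List Int) :
    (PySem.List.pyRange 0 ((l.length : Int) - 1)).map
      (fun k => (PySem.List.pyGetD l (k+1) 0 - PySem.List.pyGetD l k 0,
                 PySem.List.pyGetD l k 0)) = pvDiffPairs l := by
  rw [PySem.List.pyRange_one, List.map_map]
  have ht : (((l.length : Int) - 1) - 0).toNat = l.length - 1 := by omega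
  rw [ht]
  rw [← pvMapRange_getD l]
  apply List.map_congr_left
  intro k _
  simp only [Function.comp, zero_add]
  have e1 : ((k : Nat) : Int) + 1 = ((k + 1 : Nat) : Int) := by push_cast; ring
  rw [e1, PySem.List.pyGetD_natCast, PySem.List.pyGetD_natCast]

-- ===== VERDICT (by name: the statement is the Claim_ definition above) =====
theorem find_alternating_patterns_spec : Claim_unchanged_find_alternating_patterns := by
  intro xs sv _ hD
  have hne : xs ≠ [] := hD
  unfold find_alternating_patterns find_alternating_patterns_alt
  obtain ⟨cp, hfold, hlen, hcp⟩ := pvLoopA_inv xs sv hne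
  simp only [hfold, if_neg hcp]
  have hn0 : ((xs.length : Int) ≠ 0) := by
    have : 0 < xs.length := List.length_pos_iff.mpr hne
    omega
  rw [if_neg hn0]
  have hbounds : [(0:Int)] ++ pvBreaks xs ++ [(xs.length : Int)]
      = (0 : Int) :: (pvBreaks xs ++ [(xs.length : Int)]) := by simp
  have hassoc : (0 : Int) :: (pvBreaks xs ++ [(xs.length : Int)])
      = ((0 : Int) :: pvBreaks xs) ++ [(xs.length : Int)] := by simp
  show (pvMpAux 0 none (pvBreaks xs)
      ++ [((cp.length : Int), pvPosW none (pvBreaks xs))]).map (fun p => (p.1, p.2.getD 0))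
    = _
  rw [show ((PySem.List.pyRange 1 (xs.length : Int)).filter
        (fun i => PySem.List.pyGetD xs i 0 = PySem.List.pyGetD xs (i-1) 0)) = pvBreaks xs from rfl]
  rw [hbounds, pvMapRange_eq_diffPairs ((0 : Int) :: (pvBreaks xs ++ [(xs.length : Int)]))]
  rw [hassoc, pvBridge (pvBreaks xs) 0 (xs.length : Int) none rfl]
  rw [List.map_append]
  congr 1
  simp only [List.map_cons, List.map_nil]
  rw [hlen, pvPosW_getD 0 none (pvBreaks xs) rfl]

theorem find_alternating_patterns_changed : Claim_changed_find_alternating_patterns := by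
  unfold Claim_changed_find_alternating_patterns; decide

theorem find_alternating_patterns_tight : Claim_exact_find_alternating_patterns := by
  intro xs sv _ hD
  subst hD
  simp [find_alternating_patterns, find_alternating_patterns_alt,
        PySem.List.pyRange_one_eq_nil (by norm_num : (0:Int) ≤ 1)]
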